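-- pv_equiv track=rewrite | github.com/W-BTLW/IT-research | Algorithm/KJY/PCCP_01.py | solution
-- ===== SOURCE A (Python) =====
-- def solution(input_string):
--     answer = ''
--     tmp = ''
--     dict = {}
--
--     dict[input_string[0]] = 1
--
--     for i in range(1, len(input_string)):
--         if input_string[i] in dict:
--             if input_string[i-1] != input_string[i]:
--                 if input_string[i] not in tmp:
--                     tmp += input_string[i]
--         else:
--             dict[input_string[i]] = 1
--
--     if tmp =='':
--         answer = 'N'
--     else:
--         answer = ''.join(sorted(tmp))
--     return answer
-- ===== SOURCE B (Python) =====
-- def solution(input_string):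
--     prev = input_string[0]
--     runs = prev
--     for c in input_string[1:]:
--         if c != prev:
--             runs += c
--             prev = c
--     counts = {}
--     for c in runs:
--         counts[c] = counts.get(c, 0) + 1
--     res = sorted(c for c in counts if counts[c] >= 2)
--     return ''.join(res) if res else 'N'
-- ===== Notes on version B (the rewrite author's own statement) =====
-- stated objective: alternative
-- what changed: Replaces A's seen-dict plus adjacency-test single pass with a two-phase strategy: first collapse the string to its run-length representative (one char per maximal run), then tally character frequencies in that collapsed string and output the sorted characters occurring in at least two runs.
import Mathlib
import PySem

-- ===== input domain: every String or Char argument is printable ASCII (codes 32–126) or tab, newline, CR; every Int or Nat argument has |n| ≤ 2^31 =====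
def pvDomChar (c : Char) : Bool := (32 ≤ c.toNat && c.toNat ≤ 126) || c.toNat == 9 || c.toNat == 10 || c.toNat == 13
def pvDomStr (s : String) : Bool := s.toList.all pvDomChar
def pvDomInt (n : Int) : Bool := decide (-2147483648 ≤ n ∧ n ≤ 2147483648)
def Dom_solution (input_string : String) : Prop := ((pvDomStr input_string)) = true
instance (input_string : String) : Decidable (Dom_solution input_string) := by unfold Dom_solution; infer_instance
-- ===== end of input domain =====

-- B replaces A's seen-dict + adjacency single pass by a run-length-collapse phase followed by a
-- frequency tally of the collapsed string (objective: alternative decomposition, same cost).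

-- ===== PORT A =====
-- loop body of A's 'for i in range(1, len(input_string))', state = (tmp, dict)
def pvBodyA (cs : List Char) (st : List Char × PySem.Dict Char Int) (i : Int) :
    List Char × PySem.Dict Char Int :=
  let ci := PySem.List.pyGetD cs i ' '
  if st.2.contains ci then
    if PySem.List.pyGetD cs (i - 1) ' ' ≠ ci then
      if ci ∉ st.1 then (st.1 ++ [ci], st.2) else st
    else st
  else (st.1, st.2.insert ci 1)

def solution (input_string : String) : String :=
  match input_string.toList with
  | [] => ""   -- Python raises IndexError at input_string[0] here (excluded by Pre_)
  | c0 :: rest =>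
    let cs := c0 :: rest
    let st := (PySem.List.pyRange 1 (cs.length : Int)).foldl (pvBodyA cs)
      (([] : List Char), PySem.Dict.empty.insert c0 1)
    if st.1 = [] then "N"
    else String.ofList (PySem.List.sorted st.1 (fun x => x) false)

-- ===== PORT B =====
def solution_alt (input_string : String) : String :=
  match input_string.toList with
  | [] => ""   -- Python raises IndexError at input_string[0] here (excluded by Pre_)
  | c0 :: rest =>
    let st := rest.foldl
      (fun (st : List Char × Char) c => if c ≠ st.2 then (st.1 ++ [c], c) else st) ([c0], c0)
    let counts := st.1.foldl
      (fun (d : PySem.Dict Char Int) c => d.insert c (d.getD c 0 + 1)) PySem.Dict.empty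
    let res := PySem.List.sorted (counts.keys.filter (fun c => 2 ≤ counts.getD c 0))
      (fun x => x) false
    if res ≠ [] then String.ofList res else "N"

-- ===== PRECONDITION & SPEC =====
-- A evaluates input_string[0] unconditionally, so it raises IndexError exactly on the empty string.
def Pre_solution (input_string : String) : Prop := input_string ≠ ""
instance (input_string : String) : Decidable (Pre_solution input_string) := by
  unfold Pre_solution; infer_instance
def pvWitness_solution : String := "aabca"

def Spec_solution (input_string : String) (out : String) : Prop := out = solution_alt input_string
instance (input_string : String) (out : String) : Decidable (Spec_solution input_string out) := by
  unfold Spec_solution; infer_instance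

-- ===== CLAIM (what is proved, stated in full; the proofs are below) =====
def Claim_equal_solution : Prop := ∀ (input_string : String), Dom_solution input_string →
  Pre_solution input_string → Spec_solution input_string (solution input_string)

-- ===== LEMMAS AND PROOFS =====

-- proof-side reformulation of A's loop as a structural fold carrying the previous character
def pvStepA (st : List Char × PySem.Dict Char Int × Char) (c : Char) :
    List Char × PySem.Dict Char Int × Char :=
  if st.2.1.contains c then
    if st.2.2 ≠ c then
      if c ∉ st.1 then (st.1 ++ [c], st.2.1, c) else (st.1, st.2.1, c)
    else (st.1, st.2.1, c)
  else (st.1, st.2.1.insert c 1, c)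

-- B's run-collapsing step (literally the first lambda in solution_alt)
def pvStepB (st : List Char × Char) (c : Char) : List Char × Char :=
  if c ≠ st.2 then (st.1 ++ [c], c) else st

-- last element of c0 :: ys as a fold
theorem pv_getD_last (ys : List Char) (c0 : Char) :
    (c0 :: ys).getD ys.length ' ' = ys.foldl (fun _ c => c) c0 := by
  induction ys generalizing c0 with
  | nil => rfl
  | cons y t ih => simpa using ih y

-- the prev component of the pvStepA fold is the last character processed
theorem pv_stepA_prev (l : List Char) (t : List Char) (d : PySem.Dict Char Int) (p : Char) :
    (l.foldl pvStepA (t, d, p)).2.2 = l.foldl (fun _ c => c) p := by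
  induction l generalizing t d p with
  | nil => rfl
  | cons c l ih =>
    simp only [List.foldl_cons, pvStepA]
    split_ifs <;> simp [ih]

theorem pv_pyGetD_append (l : List Char) (x : Char) (j : Int) (h0 : 0 ≤ j)
    (hl : j < l.length) : PySem.List.pyGetD (l ++ [x]) j ' ' = PySem.List.pyGetD l j ' ' := by
  obtain ⟨n, rfl⟩ := Int.eq_ofNat_of_zero_le h0
  rw [PySem.List.pyGetD_natCast, PySem.List.pyGetD_natCast]
  have hn : n < l.length := by exact_mod_cast hl
  simp [List.getD, List.getElem?_append_left hn]

-- A's index loop over range(1, len) equals the structural fold pvStepA over the tail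
theorem pv_bridge (rest : List Char) (c0 : Char) (t : List Char) (d : PySem.Dict Char Int) :
    (PySem.List.pyRange 1 ((c0 :: rest).length : Int)).foldl (pvBodyA (c0 :: rest)) (t, d)
      = ((rest.foldl pvStepA (t, d, c0)).1, (rest.foldl pvStepA (t, d, c0)).2.1) := by
  induction rest using List.reverseRecOn with
  | nil =>
    simp only [List.length_cons, List.length_nil]
    rw [show (((0 + 1 : Nat)) : Int) = 1 by norm_num, show PySem.List.pyRange 1 1 = [] from rfl]
    simp
  | append_singleton ys x ih =>
    have hlen : (((c0 :: (ys ++ [x])).length : Nat) : Int) = ((ys.length : Int) + 1) + 1 := by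
      simp
    rw [hlen, PySem.List.pyRange_one_succ_right (by omega), List.foldl_append]
    have hinner : ∀ (acc : List Char × PySem.Dict Char Int) (i : Int),
        i ∈ PySem.List.pyRange 1 ((ys.length : Int) + 1) →
        pvBodyA (c0 :: (ys ++ [x])) acc i = pvBodyA (c0 :: ys) acc i := by
      intro acc i hi
      rw [PySem.List.mem_pyRange_one] at hi
      have hbig : (c0 :: (ys ++ [x])) = (c0 :: ys) ++ [x] := by simp
      have h1 : PySem.List.pyGetD (c0 :: (ys ++ [x])) i ' '
          = PySem.List.pyGetD (c0 :: ys) i ' ' := by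
        rw [hbig]; exact pv_pyGetD_append _ _ _ (by omega) (by simp; omega)
      have h2 : PySem.List.pyGetD (c0 :: (ys ++ [x])) (i - 1) ' '
          = PySem.List.pyGetD (c0 :: ys) (i - 1) ' ' := by
        rw [hbig]; exact pv_pyGetD_append _ _ _ (by omega) (by simp; omega)
      simp only [pvBodyA, h1, h2]
    have ihc := ih
    rw [show (((c0 :: ys).length : Nat) : Int) = (ys.length : Int) + 1 by push_cast; simp] at ihc
    rw [PySem.List.foldl_congr_mem _ _ _ _ hinner, ihc, List.foldl_append, List.foldl_cons,
      List.foldl_nil]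
    have hbig : (c0 :: (ys ++ [x])) = (c0 :: ys) ++ [x] := by simp
    have hx : PySem.List.pyGetD (c0 :: (ys ++ [x])) ((ys.length : Int) + 1) ' ' = x := by
      rw [hbig]
      have : ((ys.length : Int) + 1) = (((c0 :: ys).length : Nat) : Int) := by push_cast; simp
      rw [this, PySem.List.pyGetD_natCast]
      simp [List.getD]
    have hprev : PySem.List.pyGetD (c0 :: (ys ++ [x])) ((ys.length : Int) + 1 - 1) ' '
        = (ys.foldl pvStepA (t, d, c0)).2.2 := by
      have he : ((ys.length : Int) + 1 - 1) = ((ys.length : Nat) : Int) := by ring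
      rw [he, hbig, pv_pyGetD_append _ _ _ (by positivity) (by simp),
        PySem.List.pyGetD_natCast]
      rw [pv_stepA_prev]
      exact pv_getD_last ys c0
    simp only [List.foldl_cons, List.foldl_nil]
    simp only [pvBodyA, hx, hprev, pvStepA]
    split_ifs <;> rfl

-- joint invariant: tmp collects exactly the characters occurring in ≥ 2 maximal runs so far
theorem pv_main (l : List Char) (p : Char) (t : List Char) (d : PySem.Dict Char Int)
    (r : List Char)
    (hd : ∀ c, d.contains c = true ↔ c ∈ r) (ht : t.Nodup)
    (hm : ∀ c, c ∈ t ↔ 2 ≤ r.count c) (hp : p ∈ r) :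
    (l.foldl pvStepA (t, d, p)).1.Nodup ∧
      (∀ c, c ∈ (l.foldl pvStepA (t, d, p)).1 ↔ 2 ≤ (l.foldl pvStepB (r, p)).1.count c) := by
  induction l generalizing p t d r with
  | nil => exact ⟨ht, hm⟩
  | cons c l ih =>
    simp only [List.foldl_cons]
    by_cases hcp : c = p
    · subst hcp
      have hc : d.contains c = true := (hd c).mpr hp
      rw [show pvStepA (t, d, c) c = (t, d, c) by simp [pvStepA, hc],
          show pvStepB (r, c) c = (r, c) by simp [pvStepB]]
      exact ih c t d r hd ht hm hp
    · rw [show pvStepB (r, p) c = (r ++ [c], c) by simp [pvStepB, hcp]]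
      have hr' : ∀ x, x ∈ r ++ [c] ↔ x ∈ r ∨ x = c := by simp
      by_cases hin : d.contains c = true
      · have hcr : c ∈ r := (hd c).mp hin
        have hd' : ∀ x, d.contains x = true ↔ x ∈ r ++ [c] := by
          intro x; rw [hr', hd]
          constructor
          · exact Or.inl
          · rintro (h | rfl); exact h; exact hcr
        have hcount1 : 1 ≤ r.count c := List.count_pos_iff.mpr hcr
        by_cases htc : c ∈ t
        · rw [show pvStepA (t, d, p) c = (t, d, c) by
            simp only [pvStepA, hin, if_true]
            rw [if_pos (fun h => hcp h.symm), if_neg (not_not_intro htc)]]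
          have hm' : ∀ x, x ∈ t ↔ 2 ≤ (r ++ [c]).count x := by
            intro x
            by_cases hxc : x = c
            · subst hxc
              have hc1 : (r ++ [x]).count x = r.count x + 1 := by simp [List.count_append]
              rw [hc1]
              constructor
              · intro _; omega
              · intro _; exact htc
            · simp [List.count_append, hxc, hm x, Ne.symm hxc]
          exact ih c t d (r ++ [c]) hd' ht hm' (by simp)
        · rw [show pvStepA (t, d, p) c = (t ++ [c], d, c) by
            simp only [pvStepA, hin, if_true]
            rw [if_pos (fun h => hcp h.symm), if_pos htc]]
          have hm' : ∀ x, x ∈ t ++ [c] ↔ 2 ≤ (r ++ [c]).count x := by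
            intro x
            by_cases hxc : x = c
            · subst hxc
              simp [List.count_append]
              omega
            · simp [List.count_append, List.count_singleton, hxc, hm x,
                List.mem_append, Ne.symm hxc]
          exact ih c (t ++ [c]) d (r ++ [c]) hd'
            (by simp [List.nodup_append, ht]; exact fun a ha h => htc (h ▸ ha))
            hm' (by simp)
      · have hcr : c ∉ r := fun h => hin ((hd c).mpr h)
        rw [show pvStepA (t, d, p) c = (t, d.insert c 1, c) by simp [pvStepA, hin]]
        have hd' : ∀ x, (d.insert c 1).contains x = true ↔ x ∈ r ++ [c] := by
          intro x
          rw [PySem.Dict.contains_insert, hr']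
          simp [hd x, or_comm]
        have hm' : ∀ x, x ∈ t ↔ 2 ≤ (r ++ [c]).count x := by
          intro x
          by_cases hxc : x = c
          · subst hxc
            have h0 : r.count x = 0 := List.count_eq_zero.mpr hcr
            simp [List.count_append, h0, hm x]
          · simp [List.count_append, hxc, hm x, Ne.symm hxc]
        exact ih c t (d.insert c 1) (r ++ [c]) hd' ht hm' (by simp)

-- ===== VERDICT (by name: the statement is the Claim_ definition above) =====
theorem solution_spec : Claim_equal_solution := by
  intro s _ hpre
  unfold Spec_solution solution solution_alt
  cases hs : s.toList with
  | nil => exact absurd (String.toList_eq_nil_iff.mp hs) hpre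
  | cons c0 rest =>
    simp only []
    -- A side: rewrite the index loop as the structural fold
    rw [pv_bridge rest c0 [] (PySem.Dict.empty.insert c0 1)]
    set F := rest.foldl pvStepA ([], PySem.Dict.empty.insert c0 1, c0) with hF
    -- B side
    have hstB : rest.foldl
        (fun (st : List Char × Char) c => if c ≠ st.2 then (st.1 ++ [c], c) else st) ([c0], c0)
        = rest.foldl pvStepB ([c0], c0) := rfl
    rw [hstB]
    set r := (rest.foldl pvStepB ([c0], c0)).1 with hr
    set counts := r.foldl
      (fun (d : PySem.Dict Char Int) c => d.insert c (d.getD c 0 + 1)) PySem.Dict.empty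
      with hcounts
    have hkeys : counts.keys = PySem.Set.ofList r := by
      rw [hcounts, PySem.Dict.keys_foldl_insert r (fun d x => d.getD x 0 + 1) PySem.Dict.empty,
        PySem.Dict.keys_empty, PySem.Set.ofList_eq_foldl]
      rfl
    have hgetD : ∀ x, counts.getD x 0 = (r.count x : Int) := by
      intro x
      rw [hcounts, PySem.Dict.getD_foldl_insert_add_one r PySem.Dict.empty x]
      simp [PySem.Dict.getD_empty]
    -- the invariant at the initial states
    have hinit : ∀ c, (PySem.Dict.empty.insert c0 1 : PySem.Dict Char Int).contains c = true
        ↔ c ∈ [c0] := by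
      intro c
      rw [PySem.Dict.contains_insert]
      simp [PySem.Dict.contains_empty]
    obtain ⟨hnd, hmem⟩ := pv_main rest c0 [] (PySem.Dict.empty.insert c0 1) [c0] hinit
      List.nodup_nil (by intro c; simp [List.count_cons]; split_ifs <;> omega) (by simp)
    rw [← hF] at hnd hmem
    rw [← hr] at hmem
    -- the filtered key list of B
    set fil := counts.keys.filter (fun c => decide (2 ≤ counts.getD c 0)) with hfil
    have hfil_mem : ∀ x, x ∈ fil ↔ 2 ≤ r.count x := by
      intro x
      rw [hfil]
      simp only [List.mem_filter, hkeys, PySem.Set.mem_ofList, hgetD, decide_eq_true_eq]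
      constructor
      · intro ⟨_, h⟩; exact_mod_cast h
      · intro h
        refine ⟨List.count_pos_iff.mp (by omega), by exact_mod_cast h⟩
    have hfil_nd : fil.Nodup := by
      rw [hfil, hkeys]
      exact (PySem.Set.nodup_ofList r).filter _
    have hperm : F.1.Perm fil :=
      (List.perm_ext_iff_of_nodup hnd hfil_nd).mpr
        (fun a => (hmem a).trans (hfil_mem a).symm)
    have hsorted : PySem.List.sorted F.1 (fun x => x) false
        = PySem.List.sorted fil (fun x => x) false :=
      PySem.List.sorted_eq_sorted_of_perm F.1 fil _ (fun _ _ h => h) hperm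
    by_cases h0 : F.1 = []
    · have hfe : fil = [] := List.perm_nil.mp (h0 ▸ hperm).symm
      have hse : PySem.List.sorted fil (fun x => x) false = [] :=
        (PySem.List.sorted_eq_nil_iff _ _ _).mpr hfe
      rw [if_pos h0, if_neg (not_not_intro hse)]
    · have hne : PySem.List.sorted fil (fun x => x) false ≠ [] := by
        rw [← hsorted]
        simpa [PySem.List.sorted_eq_nil_iff] using h0
      rw [if_neg h0, if_pos hne, hsorted]
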